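-- pv_equiv track=rewrite | github.com/albertovpd/katas_python | 6kyu/street_fighter.py | street_fighter_selection
-- ===== SOURCE A (Python) =====
-- def street_fighter_selection(fighters, initial_position, moves):
--     figthers = [['Ryu','E.Honda','Blanka','Guile','Balrog','Vega'],['Ken','Chun Li','Zangief','Dhalsim','Sagat','M. Bison']]
--     final = []
--     f = initial_position[0]
--     c = initial_position[1]
--
--     for move in moves:
--
--         if move == 'up':
--             f -= 1
--             if f < 0:
--                 f = 0
--                 a = fighters[f][c]
--                 final.append(a)
--             else:
--                 a = fighters[f][c]
--                 final.append(a)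
--
--         elif move == 'down':
--             f += 1
--             if f > 1:
--                 f = 1
--                 a = fighters[f][c]
--                 final.append(a)
--             else:
--                 a = fighters[f][c]
--                 final.append(a)
--
--         elif move == 'right':
--             c += 1
--
--             if c > 5:
--                 c = 0
--                 a = fighters[f][c]
--                 final.append(a)
--             else:
--                 a = fighters[f][c]
--                 final.append(a)
--
--         elif move == 'left':
--             c -= 1
--
--             if c < 0:
--                 c = 5
--                 a = fighters[f][c]
--                 final.append(a)
--             else:
--                 a = fighters[f][c]
--                 final.append(a)
--
--
--
--     return final
-- ===== SOURCE B (Python) =====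
-- def street_fighter_selection(fighters, initial_position, moves):
--     # Staged computation instead of a per-step cursor simulation:
--     # 1) filter out unrecognized moves;
--     # 2) the row after each step is determined by the LAST vertical move so far
--     #    ('up' always lands on row 0, 'down' on row 1, clamping makes the step
--     #    size irrelevant) -- computed as one scan over the steps;
--     # 3) the column after each step is the initial column plus the running
--     #    right-minus-left balance, wrapped mod 6 -- a second, independent scan;
--     # 4) gather the fighters by zipping the two position streams.
--     steps = [m for m in moves if m in ('up', 'down', 'left', 'right')]
--     rows, r = [], initial_position[0]
--     for m in steps:
--         if m == 'up':
--             r = 0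
--         elif m == 'down':
--             r = 1
--         rows.append(r)
--     cols, d = [], initial_position[1]
--     for m in steps:
--         d += (m == 'right') - (m == 'left')
--         cols.append(d % 6)
--     return [fighters[r][c] for r, c in zip(rows, cols)]
-- ===== Notes on version B (the rewrite author's own statement) =====
-- stated objective: alternative
-- what changed: A simulates a cursor move by move with four duplicated increment-then-boundary-fix branches and one append per step; B is staged: it filters the recognized moves, computes the row stream (last vertical move wins, since clamping makes 'up' always land on row 0 and 'down' on row 1) and the column stream (initial column plus running right-minus-left balance, wrapped mod 6) as two independent scans, then gathers the fighters by zipping the two streams.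
-- outside the precondition, e.g. on street_fighter_selection([['a', 'b', 'c', 'd', 'e', 'f', 'g']], [0, 6], ['right']): A returns ['a'], B returns ['b']; on street_fighter_selection([['a', 'b', 'c'], ['d', 'e', 'f']], [0, 0], ['right']): A returns ['b'], B returns ['b']
import Mathlib
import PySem

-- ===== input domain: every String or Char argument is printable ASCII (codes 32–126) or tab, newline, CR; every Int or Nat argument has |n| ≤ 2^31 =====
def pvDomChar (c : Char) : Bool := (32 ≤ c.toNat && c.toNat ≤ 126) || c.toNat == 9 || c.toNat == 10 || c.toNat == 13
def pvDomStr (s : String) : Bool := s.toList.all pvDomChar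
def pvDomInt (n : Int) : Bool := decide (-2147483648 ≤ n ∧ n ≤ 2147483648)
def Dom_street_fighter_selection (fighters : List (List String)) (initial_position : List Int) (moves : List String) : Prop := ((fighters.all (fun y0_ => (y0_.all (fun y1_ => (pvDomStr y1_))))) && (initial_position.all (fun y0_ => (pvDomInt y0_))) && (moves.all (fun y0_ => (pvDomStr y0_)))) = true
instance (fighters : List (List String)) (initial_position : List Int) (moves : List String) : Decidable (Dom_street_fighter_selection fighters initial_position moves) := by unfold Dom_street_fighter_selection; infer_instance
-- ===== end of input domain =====

-- B replaces A's per-step cursor simulation by a staged pipeline: filter the recognized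
-- moves, compute the row and column streams as two independent scans, then zip-gather
-- the fighters (alternative decomposition, same cost).

-- ===== PORT A =====
-- indexing fighters[f][c] is ported as pyGetD∘pyGetD; Pre_ keeps every index in range,
-- so the "" default is never produced on admitted inputs
def street_fighter_selection_loop (fighters : List (List String)) : List String → Int → Int → List String → List String
  | [], _, _, final => final
  | move :: rest, f, c, final =>
    if move == "up" then
      if f - 1 < 0 then
        street_fighter_selection_loop fighters rest 0 c (final ++ [PySem.List.pyGetD (PySem.List.pyGetD fighters 0 []) c ""])
      else
        street_fighter_selection_loop fighters rest (f - 1) c (final ++ [PySem.List.pyGetD (PySem.List.pyGetD fighters (f - 1) []) c ""])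
    else if move == "down" then
      if f + 1 > 1 then
        street_fighter_selection_loop fighters rest 1 c (final ++ [PySem.List.pyGetD (PySem.List.pyGetD fighters 1 []) c ""])
      else
        street_fighter_selection_loop fighters rest (f + 1) c (final ++ [PySem.List.pyGetD (PySem.List.pyGetD fighters (f + 1) []) c ""])
    else if move == "right" then
      if c + 1 > 5 then
        street_fighter_selection_loop fighters rest f 0 (final ++ [PySem.List.pyGetD (PySem.List.pyGetD fighters f []) 0 ""])
      else
        street_fighter_selection_loop fighters rest f (c + 1) (final ++ [PySem.List.pyGetD (PySem.List.pyGetD fighters f []) (c + 1) ""])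
    else if move == "left" then
      if c - 1 < 0 then
        street_fighter_selection_loop fighters rest f 5 (final ++ [PySem.List.pyGetD (PySem.List.pyGetD fighters f []) 5 ""])
      else
        street_fighter_selection_loop fighters rest f (c - 1) (final ++ [PySem.List.pyGetD (PySem.List.pyGetD fighters f []) (c - 1) ""])
    else
      street_fighter_selection_loop fighters rest f c final

def street_fighter_selection (fighters : List (List String)) (initial_position : List Int) (moves : List String) : List String :=
  street_fighter_selection_loop fighters moves (PySem.List.pyGetD initial_position 0 0) (PySem.List.pyGetD initial_position 1 0) []

-- ===== PORT B =====
-- stage 1: keep only recognized moves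
def sfs_steps (moves : List String) : List String :=
  moves.filter (fun m => m == "up" || m == "down" || m == "left" || m == "right")

-- stage 2: the row after each step (last vertical move wins)
def sfs_rows : List String → Int → List Int
  | [], _ => []
  | m :: rest, r =>
    let r' := if m == "up" then 0 else if m == "down" then 1 else r
    r' :: sfs_rows rest r'

-- stage 3: the column after each step (running right-minus-left balance mod 6)
def sfs_cols : List String → Int → List Int
  | [], _ => []
  | m :: rest, d =>
    let d' := d + (if m == "right" then (1 : Int) else 0) - (if m == "left" then (1 : Int) else 0)
    PySem.Int.mod d' 6 :: sfs_cols rest d'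

def street_fighter_selection_alt (fighters : List (List String)) (initial_position : List Int) (moves : List String) : List String :=
  let steps := sfs_steps moves
  (List.zip (sfs_rows steps (PySem.List.pyGetD initial_position 0 0))
            (sfs_cols steps (PySem.List.pyGetD initial_position 1 0))).map
    (fun rc => PySem.List.pyGetD (PySem.List.pyGetD fighters rc.1 []) rc.2 "")

-- ===== PRECONDITION & SPEC =====
-- Pre_ restricts to the kata's natural domain: initial position on the 2×6 grid and, when any
-- recognized move occurs, a grid with (at least) 2 rows of (at least) 6 fighters. This excludes
-- some inputs on which A still returns (out-of-grid positions handled by A's single-step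
-- clamp/wrap or Python negative-index wraparound, and — conservatively — grids with rows
-- shorter than 6 whose move sequence happens never to leave them).
def Pre_street_fighter_selection (fighters : List (List String)) (initial_position : List Int) (moves : List String) : Prop :=
  2 ≤ initial_position.length ∧
  ((∃ m ∈ moves, m = "up" ∨ m = "down" ∨ m = "left" ∨ m = "right") →
    (initial_position.getD 0 0 = 0 ∨ initial_position.getD 0 0 = 1) ∧
    0 ≤ initial_position.getD 1 0 ∧ initial_position.getD 1 0 ≤ 5 ∧
    2 ≤ fighters.length ∧ 6 ≤ (fighters.getD 0 []).length ∧ 6 ≤ (fighters.getD 1 []).length)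
instance (fighters : List (List String)) (initial_position : List Int) (moves : List String) : Decidable (Pre_street_fighter_selection fighters initial_position moves) := by unfold Pre_street_fighter_selection; infer_instance

def pvWitness_street_fighter_selection : List (List String) × List Int × List String :=
  ([["Ryu","E.Honda","Blanka","Guile","Balrog","Vega"],["Ken","Chun Li","Zangief","Dhalsim","Sagat","M. Bison"]], [0, 0], ["down", "right", "left", "left", "up"])

def Spec_street_fighter_selection (fighters : List (List String)) (initial_position : List Int) (moves : List String) (out : List String) : Prop := out = street_fighter_selection_alt fighters initial_position moves
instance (fighters : List (List String)) (initial_position : List Int) (moves : List String) (out : List String) : Decidable (Spec_street_fighter_selection fighters initial_position moves out) := by unfold Spec_street_fighter_selection; infer_instance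

-- ===== CLAIM (what is proved, stated in full; the proofs are below) =====
def Claim_equal_street_fighter_selection : Prop := ∀ (fighters : List (List String)) (initial_position : List Int) (moves : List String), Dom_street_fighter_selection fighters initial_position moves → Pre_street_fighter_selection fighters initial_position moves → Spec_street_fighter_selection fighters initial_position moves (street_fighter_selection fighters initial_position moves)

-- ===== LEMMAS AND PROOFS =====

-- The gather step applied to the staged streams, as one expression.
def sfs_gather (fighters : List (List String)) (ms : List String) (f d : Int) : List String :=
  (List.zip (sfs_rows (sfs_steps ms) f) (sfs_cols (sfs_steps ms) d)).map
    (fun rc => PySem.List.pyGetD (PySem.List.pyGetD fighters rc.1 []) rc.2 "")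

-- one-step unfolding of the staged gather, per move kind
theorem gather_up (fighters : List (List String)) (rest : List String) (f d : Int) :
    sfs_gather fighters ("up" :: rest) f d
      = PySem.List.pyGetD (PySem.List.pyGetD fighters 0 []) (PySem.Int.mod d 6) "" :: sfs_gather fighters rest 0 d := by
  simp [sfs_gather, sfs_steps, sfs_rows, sfs_cols]

theorem gather_down (fighters : List (List String)) (rest : List String) (f d : Int) :
    sfs_gather fighters ("down" :: rest) f d
      = PySem.List.pyGetD (PySem.List.pyGetD fighters 1 []) (PySem.Int.mod d 6) "" :: sfs_gather fighters rest 1 d := by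
  simp [sfs_gather, sfs_steps, sfs_rows, sfs_cols]

theorem gather_right (fighters : List (List String)) (rest : List String) (f d : Int) :
    sfs_gather fighters ("right" :: rest) f d
      = PySem.List.pyGetD (PySem.List.pyGetD fighters f []) (PySem.Int.mod (d + 1) 6) "" :: sfs_gather fighters rest f (d + 1) := by
  simp [sfs_gather, sfs_steps, sfs_rows, sfs_cols]

theorem gather_left (fighters : List (List String)) (rest : List String) (f d : Int) :
    sfs_gather fighters ("left" :: rest) f d
      = PySem.List.pyGetD (PySem.List.pyGetD fighters f []) (PySem.Int.mod (d - 1) 6) "" :: sfs_gather fighters rest f (d - 1) := by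
  simp [sfs_gather, sfs_steps, sfs_rows, sfs_cols, sub_eq_add_neg]

theorem gather_other (fighters : List (List String)) (m : String) (rest : List String) (f d : Int)
    (h1 : m ≠ "up") (h2 : m ≠ "down") (h3 : m ≠ "left") (h4 : m ≠ "right") :
    sfs_gather fighters (m :: rest) f d = sfs_gather fighters rest f d := by
  simp [sfs_gather, sfs_steps, h1, h2, h3, h4]

-- one-step unfolding of A's loop, per move kind (row clamped in {0,1})
theorem loop_up_cons (fighters : List (List String)) (rest : List String) (f c : Int) (acc : List String)
    (hf : f = 0 ∨ f = 1) :
    street_fighter_selection_loop fighters ("up" :: rest) f c acc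
      = street_fighter_selection_loop fighters rest 0 c (acc ++ [PySem.List.pyGetD (PySem.List.pyGetD fighters 0 []) c ""]) := by
  rcases hf with h | h <;> subst h <;> norm_num [street_fighter_selection_loop]

theorem loop_down_cons (fighters : List (List String)) (rest : List String) (f c : Int) (acc : List String)
    (hf : f = 0 ∨ f = 1) :
    street_fighter_selection_loop fighters ("down" :: rest) f c acc
      = street_fighter_selection_loop fighters rest 1 c (acc ++ [PySem.List.pyGetD (PySem.List.pyGetD fighters 1 []) c ""]) := by
  rcases hf with h | h <;> subst h <;> norm_num [street_fighter_selection_loop] <;>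
    exact fun h => absurd h (by decide)

theorem loop_right_cons (fighters : List (List String)) (rest : List String) (f c : Int) (acc : List String) :
    street_fighter_selection_loop fighters ("right" :: rest) f c acc
      = street_fighter_selection_loop fighters rest f (if c + 1 > 5 then 0 else c + 1)
          (acc ++ [PySem.List.pyGetD (PySem.List.pyGetD fighters f []) (if c + 1 > 5 then 0 else c + 1) ""]) := by
  by_cases h : c + 1 > 5 <;> simp [street_fighter_selection_loop, h]

theorem loop_left_cons (fighters : List (List String)) (rest : List String) (f c : Int) (acc : List String) :
    street_fighter_selection_loop fighters ("left" :: rest) f c acc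
      = street_fighter_selection_loop fighters rest f (if c - 1 < 0 then 5 else c - 1)
          (acc ++ [PySem.List.pyGetD (PySem.List.pyGetD fighters f []) (if c - 1 < 0 then 5 else c - 1) ""]) := by
  by_cases h : c - 1 < 0 <;> simp [street_fighter_selection_loop, h]

theorem loop_other_cons (fighters : List (List String)) (m : String) (rest : List String) (f c : Int) (acc : List String)
    (h1 : m ≠ "up") (h2 : m ≠ "down") (h3 : m ≠ "left") (h4 : m ≠ "right") :
    street_fighter_selection_loop fighters (m :: rest) f c acc
      = street_fighter_selection_loop fighters rest f c acc := by
  simp [street_fighter_selection_loop, h1, h2, h3, h4]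

-- With the invariant f ∈ {0,1}, 0 ≤ c ≤ 5, c = d % 6, A\'s loop produces exactly the
-- accumulator followed by B\'s staged gather.
theorem loop_eq_gather (fighters : List (List String)) (ms : List String) (f c d : Int) (acc : List String)
    (hf : f = 0 ∨ f = 1) (hc0 : 0 ≤ c) (hc5 : c ≤ 5) (hch : c = PySem.Int.mod d 6) :
    street_fighter_selection_loop fighters ms f c acc = acc ++ sfs_gather fighters ms f d := by
  induction ms generalizing f c d acc with
  | nil => simp [street_fighter_selection_loop, sfs_gather, sfs_steps, sfs_rows, sfs_cols]
  | cons m rest ih =>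
    have hmod : ∀ x : Int, PySem.Int.mod x 6 = x % 6 := fun x => PySem.Int.mod_eq_emod_of_pos (by omega)
    rw [hmod] at hch
    by_cases hup : m = "up"
    · subst hup
      rw [loop_up_cons fighters rest f c acc hf, gather_up,
          ih 0 c d _ (Or.inl rfl) hc0 hc5 (by rw [hmod]; omega),
          show PySem.Int.mod d 6 = c from by rw [hmod]; omega]
      simp
    · by_cases hdn : m = "down"
      · subst hdn
        rw [loop_down_cons fighters rest f c acc hf, gather_down,
            ih 1 c d _ (Or.inr rfl) hc0 hc5 (by rw [hmod]; omega),
            show PySem.Int.mod d 6 = c from by rw [hmod]; omega]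
        simp
      · by_cases hrt : m = "right"
        · subst hrt
          have hc' : (if c + 1 > 5 then (0 : Int) else c + 1) = PySem.Int.mod (d + 1) 6 := by
            rw [hmod]; split_ifs with h <;> omega
          rw [loop_right_cons, gather_right,
              ih f (if c + 1 > 5 then 0 else c + 1) (d + 1) _ hf
                (by split_ifs <;> omega) (by split_ifs <;> omega) hc',
              hc']
          simp
        · by_cases hlt : m = "left"
          · subst hlt
            have hc' : (if c - 1 < 0 then (5 : Int) else c - 1) = PySem.Int.mod (d - 1) 6 := by
              rw [hmod]; split_ifs with h <;> omega
            rw [loop_left_cons, gather_left,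
                ih f (if c - 1 < 0 then 5 else c - 1) (d - 1) _ hf
                  (by split_ifs <;> omega) (by split_ifs <;> omega) hc',
                hc']
            simp
          · rw [loop_other_cons fighters m rest f c acc hup hdn hlt hrt,
                gather_other fighters m rest f d hup hdn hlt hrt]
            exact ih f c d acc hf hc0 hc5 (by rw [hmod]; omega)

-- If no move is recognized, A\'s loop returns the accumulator and B\'s steps list is empty.
theorem loop_skip_a (fighters : List (List String)) (ms : List String) (f c : Int) (acc : List String)
    (h : ∀ m ∈ ms, ¬(m = "up" ∨ m = "down" ∨ m = "left" ∨ m = "right")) :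
    street_fighter_selection_loop fighters ms f c acc = acc := by
  induction ms generalizing acc with
  | nil => rfl
  | cons m rest ih =>
    have hm := h m (by simp)
    rw [loop_other_cons fighters m rest f c acc (by tauto) (by tauto) (by tauto) (by tauto)]
    exact ih acc (fun x hx => h x (List.mem_cons_of_mem _ hx))

theorem steps_skip (ms : List String)
    (h : ∀ m ∈ ms, ¬(m = "up" ∨ m = "down" ∨ m = "left" ∨ m = "right")) :
    sfs_steps ms = [] := by
  induction ms with
  | nil => rfl
  | cons m rest ih =>
    have hm := h m (by simp)
    have h1 : m ≠ "up" := by tauto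
    have h2 : m ≠ "down" := by tauto
    have h3 : m ≠ "left" := by tauto
    have h4 : m ≠ "right" := by tauto
    simp only [sfs_steps, List.filter_cons] at *
    simp [h1, h2, h3, h4]
    intro a ha
    have := h a (List.mem_cons_of_mem _ ha)
    tauto

-- ===== VERDICT (by name: the statement is the Claim_ definition above) =====
theorem street_fighter_selection_spec : Claim_equal_street_fighter_selection := by
  intro fighters ip moves _ hpre
  obtain ⟨hlen, hrec⟩ := hpre
  unfold Spec_street_fighter_selection street_fighter_selection street_fighter_selection_alt
  by_cases hex : ∃ m ∈ moves, m = "up" ∨ m = "down" ∨ m = "left" ∨ m = "right"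
  · obtain ⟨hf, hc0, hc5, -⟩ := hrec hex
    have hip0 : PySem.List.pyGetD ip 0 0 = ip.getD 0 0 := by
      rw [PySem.List.pyGetD_of_nonneg ip 0 (by omega)]; norm_num
    have hip1 : PySem.List.pyGetD ip 1 0 = ip.getD 1 0 := by
      rw [PySem.List.pyGetD_of_nonneg ip 0 (by omega)]; norm_num
    rw [loop_eq_gather fighters moves _ _ (PySem.List.pyGetD ip 1 0) []
        (by rw [hip0]; exact hf) (by rw [hip1]; omega) (by rw [hip1]; omega)
        (by rw [PySem.Int.mod_eq_emod_of_pos (show (0:Int) < 6 by omega), hip1]; omega)]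
    simp [sfs_gather]
  · rw [not_exists] at hex
    rw [loop_skip_a fighters moves _ _ [] (fun m hm hp => hex m ⟨hm, hp⟩),
        steps_skip moves (fun m hm hp => hex m ⟨hm, hp⟩)]
    rfl
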